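-- pv_equiv track=rewrite | github.com/jcraig949jfi/Prometheus | cartography/shared/scripts/v2/residue_starvation_scan.py | analyze_classes
-- ===== SOURCE A (Python) =====
-- def qr_set(ell):
--     """Quadratic residues mod ell (including 0)."""
--     return {(x * x) % ell for x in range(ell)}
--
-- def analyze_classes(classes_hit, ell):
--     """Try to identify the residue class pattern."""
--     qr = qr_set(ell)
--     qnr = set(range(ell)) - qr
--
--     if classes_hit == qr:
--         return "quadratic residues (CM signature)"
--     if classes_hit == qnr | {0}:
--         return "quadratic non-residues + 0"
--
--     # Check if it's a coset of a subgroup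
--     for d in range(2, ell):
--         if (ell - 1) % d == 0:
--             # Subgroup of order (ell-1)/d in (Z/ell)*
--             gen = None
--             for g in range(2, ell):
--                 if pow(g, (ell-1)//d, ell) != 1:
--                     if pow(g, ell-1, ell) == 1:
--                         gen = g
--                         break
--             if gen:
--                 subgroup = {pow(gen, k*d, ell) for k in range((ell-1)//d)}
--                 subgroup_with_0 = subgroup | {0}
--                 if classes_hit == subgroup_with_0:
--                     return f"subgroup of index {d} in (Z/{ell})* + {{0}}"
--
--     return None
-- ===== SOURCE B (Python) =====
-- def _match_subgroup(classes_hit, ell, d):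
--     """Check whether classes_hit is (subgroup of index d) | {0}; return label or None."""
--     e = (ell - 1) // d
--     gen = None
--     for g in range(2, ell):
--         if pow(g, ell - 1, ell) == 1:
--             # g is a unit whose order divides ell-1; find that order t
--             x, t = g, 1
--             while x != 1:
--                 x = x * g % ell
--                 t += 1
--             # g**e % ell != 1  <=>  t does not divide e
--             if e % t != 0:
--                 gen = g
--                 break
--     if gen:
--         gd = pow(gen, d, ell)
--         # subgroup generated by gen**d, by closure under multiplication
--         sub = {1}
--         x = gd
--         while x != 1:
--             sub.add(x)
--             x = x * gd % ell
--         if classes_hit == sub | {0}: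
--             return f"subgroup of index {d} in (Z/{ell})* + {{0}}"
--     return None
--
--
-- def analyze_classes(classes_hit, ell):
--     """Try to identify the residue class pattern."""
--     # squares are symmetric (x^2 == (ell-x)^2), so half the range suffices
--     qr = {x * x % ell for x in range(min(ell, ell // 2 + 1))}
--
--     if classes_hit == qr:
--         return "quadratic residues (CM signature)"
--     if classes_hit == {x for x in range(ell) if x not in qr} | {0}:
--         return "quadratic non-residues + 0"
--
--     for d in (d for d in range(2, ell) if (ell - 1) % d == 0):
--         res = _match_subgroup(classes_hit, ell, d)
--         if res is not None:
--             return res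
--     return None
-- ===== Notes on version B (the rewrite author's own statement) =====
-- stated objective: alternative
-- what changed: B computes quadratic residues over half the range using the x^2=(ell-x)^2 symmetry, builds qnr|{0} by one membership filter instead of set difference plus union, pre-filters the divisors of ell-1 and dispatches each to a helper that finds a generator via a multiplicative-order computation (iterated multiplication + divisibility) and builds the subgroup by closure under multiplication, instead of A's inline scan with repeated modular exponentiations.
import Mathlib
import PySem

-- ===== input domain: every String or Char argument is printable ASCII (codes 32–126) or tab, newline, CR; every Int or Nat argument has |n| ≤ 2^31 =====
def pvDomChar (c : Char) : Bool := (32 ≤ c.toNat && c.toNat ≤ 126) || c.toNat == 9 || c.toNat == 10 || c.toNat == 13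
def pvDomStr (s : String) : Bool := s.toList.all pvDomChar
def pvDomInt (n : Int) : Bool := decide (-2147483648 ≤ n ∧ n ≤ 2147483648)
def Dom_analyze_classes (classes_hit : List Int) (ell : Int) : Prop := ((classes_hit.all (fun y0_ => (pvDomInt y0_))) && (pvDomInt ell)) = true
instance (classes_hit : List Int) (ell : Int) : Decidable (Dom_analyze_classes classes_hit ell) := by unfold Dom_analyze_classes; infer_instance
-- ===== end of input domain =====

-- B computes the residues over half the range via the x^2 = (ell-x)^2 symmetry, builds
-- qnr|{0} by a membership filter, pre-filters the divisors of ell-1 and dispatches each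
-- to a helper that finds a generator through a multiplicative-order computation and builds
-- the subgroup by closure under multiplication; objective: alternative.

-- ===== PORT A =====
-- qr_set(ell): set comprehension over range(ell), in iteration order
def qrA (ell : Int) : PySem.Set Int :=
  PySem.Set.ofList ((PySem.List.pyRange 0 ell 1).map (fun x => PySem.Int.mod (x * x) ell))

-- inner 'for g in range(2, ell)' search with break; exponents are nonnegative whenever
-- this is reached (ell ≥ 3, e ≥ 1), so .toNat is exact w.r.t. Python's pow
def genA (ell e : Int) : List Int → Option Int
  | [] => none
  | g :: gs =>
    if PySem.Int.powMod g e.toNat ell ≠ 1 then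
      if PySem.Int.powMod g (ell - 1).toNat ell = 1 then some g else genA ell e gs
    else genA ell e gs

-- {pow(gen, k*d, ell) for k in range((ell-1)//d)}
def subA (gen d ell e : Int) : PySem.Set Int :=
  PySem.Set.ofList ((PySem.List.pyRange 0 e 1).map (fun k => PySem.Int.powMod gen (k * d).toNat ell))

-- 'for d in range(2, ell)'
def loopA (classes_hit : List Int) (ell : Int) : List Int → Option String
  | [] => none
  | d :: ds =>
    if PySem.Int.mod (ell - 1) d = 0 then
      let e := PySem.Int.floordiv (ell - 1) d
      match genA ell e (PySem.List.pyRange 2 ell 1) with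
      | some gen =>
        if PySem.Set.equal classes_hit (PySem.Set.union (subA gen d ell e) [0]) then
          some ("subgroup of index " ++ PySem.Int.toStr d ++ " in (Z/" ++ PySem.Int.toStr ell ++ ")* + {0}")
        else loopA classes_hit ell ds
      | none => loopA classes_hit ell ds
    else loopA classes_hit ell ds

def analyze_classes (classes_hit : List Int) (ell : Int) : Option String :=
  let qr := qrA ell
  let qnr := PySem.Set.diff (PySem.Set.ofList (PySem.List.pyRange 0 ell 1)) qr
  if PySem.Set.equal classes_hit qr then some "quadratic residues (CM signature)"
  else if PySem.Set.equal classes_hit (PySem.Set.union qnr [0]) then some "quadratic non-residues + 0"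
  else loopA classes_hit ell (PySem.List.pyRange 2 ell 1)

-- ===== PORT B =====
-- {x*x % ell for x in range(min(ell, ell//2 + 1))}
def qrB (ell : Int) : PySem.Set Int :=
  PySem.Set.ofList ((PySem.List.pyRange 0 (min ell (PySem.Int.floordiv ell 2 + 1)) 1).map
    (fun x => PySem.Int.mod (x * x) ell))

-- 'x, t = g, 1; while x != 1: x = x*g % ell; t += 1' — the Python loop is only reached
-- when g**(ell-1) % ell == 1, which makes it stop within ell-1 steps; fuel ell.toNat
-- models that (sufficiency is proved below, the fuel-exhausted branch is unreachable)
def ordLoopB (g ell : Int) : Nat → Int × Int → Int × Int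
  | 0, xt => xt
  | fuel + 1, (x, t) => if x ≠ 1 then ordLoopB g ell fuel (PySem.Int.mod (x * g) ell, t + 1) else (x, t)

def genB (ell e : Int) : List Int → Option Int
  | [] => none
  | g :: gs =>
    if PySem.Int.powMod g (ell - 1).toNat ell = 1 then
      let xt := ordLoopB g ell ell.toNat (g, 1)
      if PySem.Int.mod e xt.2 ≠ 0 then some g else genB ell e gs
    else genB ell e gs

-- 'sub = {1}; x = gd; while x != 1: sub.add(x); x = x*gd % ell' — same fuel remark:
-- gd is a power of a unit here, so the loop stops within ell-1 steps
def closLoopB (gd ell : Int) : Nat → PySem.Set Int → Int → PySem.Set Int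
  | 0, s, _ => s
  | fuel + 1, s, x =>
    if x ≠ 1 then closLoopB gd ell fuel (PySem.Set.add s x) (PySem.Int.mod (x * gd) ell) else s

-- _match_subgroup(classes_hit, ell, d)
def matchSubB (classes_hit : List Int) (ell d : Int) : Option String :=
  let e := PySem.Int.floordiv (ell - 1) d
  match genB ell e (PySem.List.pyRange 2 ell 1) with
  | some gen =>
    let gd := PySem.Int.powMod gen d.toNat ell
    let sub := closLoopB gd ell ell.toNat (PySem.Set.ofList [1]) gd
    if PySem.Set.equal classes_hit (PySem.Set.union sub [0]) then
      some ("subgroup of index " ++ PySem.Int.toStr d ++ " in (Z/" ++ PySem.Int.toStr ell ++ ")* + {0}")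
    else none
  | none => none

def analyze_classes_alt (classes_hit : List Int) (ell : Int) : Option String :=
  let qr := qrB ell
  if PySem.Set.equal classes_hit qr then some "quadratic residues (CM signature)"
  else if PySem.Set.equal classes_hit
      (PySem.Set.union (PySem.Set.ofList ((PySem.List.pyRange 0 ell 1).filter
        (fun x => !(PySem.Set.contains qr x)))) [0]) then
    some "quadratic non-residues + 0"
  else
    ((PySem.List.pyRange 2 ell 1).filter (fun d => PySem.Int.mod (ell - 1) d == 0)).findSome?
      (matchSubB classes_hit ell)

-- ===== PRECONDITION & SPEC =====
def Spec_analyze_classes (classes_hit : List Int) (ell : Int) (out : Option String) : Prop := out = analyze_classes_alt classes_hit ell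
instance (classes_hit : List Int) (ell : Int) (out : Option String) : Decidable (Spec_analyze_classes classes_hit ell out) := by unfold Spec_analyze_classes; infer_instance

-- ===== CLAIM (what is proved, stated in full; the proofs are below) =====
def Claim_equal_analyze_classes : Prop := ∀ (classes_hit : List Int) (ell : Int), Dom_analyze_classes classes_hit ell → Spec_analyze_classes classes_hit ell (analyze_classes classes_hit ell)

-- ===== LEMMAS AND PROOFS =====

theorem powmod_period (L a m : Nat) (hm : a ^ m % L = 1) (n : Nat) :
    a ^ (n + m) % L = a ^ n % L := by
  rw [pow_add, Nat.mul_mod, hm, Nat.mul_one, Nat.mod_mod]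

theorem powmod_mod_period (L a m : Nat) (h1 : 1 ≤ m) (hm : a ^ m % L = 1) (n : Nat) :
    a ^ n % L = a ^ (n % m) % L := by
  induction n using Nat.strong_induction_on with
  | _ n ih =>
    by_cases h : n < m
    · rw [Nat.mod_eq_of_lt h]
    · rw [Nat.not_lt] at h
      have hn : n = (n - m) + m := by omega
      rw [hn, powmod_period L a m hm, ih (n - m) (by omega), Nat.add_mod_right]

theorem ord_dvd_iff (L a m : Nat) (hL : 2 ≤ L) (h1 : 1 ≤ m) (hm : a ^ m % L = 1)
    (hmin : ∀ s, 1 ≤ s → s < m → a ^ s % L ≠ 1) (n : Nat) :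
    a ^ n % L = 1 ↔ m ∣ n := by
  constructor
  · intro h
    rw [powmod_mod_period L a m h1 hm] at h
    rcases Nat.eq_zero_or_pos (n % m) with h0 | hpos
    · exact Nat.dvd_of_mod_eq_zero h0
    · exact absurd h (hmin _ hpos (Nat.mod_lt _ (by omega)))
  · intro h
    rw [powmod_mod_period L a m h1 hm, Nat.dvd_iff_mod_eq_zero.mp h, pow_zero,
      Nat.mod_eq_of_lt (by omega)]

theorem powMod_cast (a n L : Nat) :
    PySem.Int.powMod (a : Int) n (L : Int) = ((a ^ n % L : Nat) : Int) := by
  unfold PySem.Int.powMod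
  rw [show ((a : Int) ^ n) = ((a ^ n : Nat) : Int) by push_cast; ring]
  exact PySem.Int.mod_natCast _ _

theorem step_cast (G T L : Nat) :
    PySem.Int.mod (((G ^ T % L : Nat) : Int) * (G : Nat)) (L : Int) = ((G ^ (T + 1) % L : Nat) : Int) := by
  rw [show (((G ^ T % L : Nat) : Int) * (G : Nat)) = ((G ^ T % L * G : Nat) : Int) by push_cast; ring,
    PySem.Int.mod_natCast]
  congr 1
  rw [Nat.mod_mul_mod, ← pow_succ]

theorem ordLoopB_inv (G L m : Nat) (h1 : 1 ≤ m) (hm : G ^ m % L = 1)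
    (hmin : ∀ s, 1 ≤ s → s < m → G ^ s % L ≠ 1)
    (fuel T : Nat) (hT : 1 ≤ T) (hTm : T ≤ m) (hfuel : m ≤ T + fuel) :
    ordLoopB (G : Int) (L : Int) fuel (((G ^ T % L : Nat) : Int), (T : Int)) = (1, (m : Int)) := by
  induction fuel generalizing T with
  | zero =>
    have hTm' : T = m := by omega
    subst hTm'
    rw [hm]
    rfl
  | succ fuel ih =>
    by_cases hTm' : T = m
    · subst hTm'
      rw [hm]
      simp [ordLoopB]
    · have hx : G ^ T % L ≠ 1 := hmin T hT (by omega)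
      have hx' : ((G ^ T % L : Nat) : Int) ≠ 1 := by exact_mod_cast hx
      show (if ((G ^ T % L : Nat) : Int) ≠ 1 then _ else _) = _
      rw [if_pos hx', step_cast G T L,
        show ((T : Int) + 1) = ((T + 1 : Nat) : Int) by push_cast; ring]
      exact ih (T + 1) (by omega) (by omega) (by omega)

theorem closLoopB_inv (GD L m : Nat) (h1 : 1 ≤ m) (hm : GD ^ m % L = 1)
    (hmin : ∀ s, 1 ≤ s → s < m → GD ^ s % L ≠ 1)
    (fuel K : Nat) (hK : 1 ≤ K) (hKm : K ≤ m) (hfuel : m ≤ K + fuel)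
    (s : PySem.Set Int) (z : Int) :
    (z ∈ closLoopB (GD : Int) (L : Int) fuel s ((GD ^ K % L : Nat) : Int) ↔
      z ∈ s ∨ ∃ k, K ≤ k ∧ k < m ∧ z = ((GD ^ k % L : Nat) : Int)) := by
  induction fuel generalizing K s with
  | zero =>
    have hKm' : K = m := by omega
    subst hKm'
    simp only [closLoopB]
    constructor
    · exact Or.inl
    · rintro (h | ⟨k, hk1, hk2, _⟩)
      · exact h
      · omega
  | succ fuel ih =>
    by_cases hKm' : K = m
    · subst hKm'
      rw [hm]
      simp only [closLoopB, ne_eq, Nat.cast_one, not_true_eq_false, if_false]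
      constructor
      · exact Or.inl
      · rintro (h | ⟨k, hk1, hk2, _⟩)
        · exact h
        · omega
    · have hx : GD ^ K % L ≠ 1 := hmin K hK (by omega)
      have hx' : ((GD ^ K % L : Nat) : Int) ≠ 1 := by exact_mod_cast hx
      show (z ∈ if ((GD ^ K % L : Nat) : Int) ≠ 1 then _ else _) ↔ _
      rw [if_pos hx', step_cast GD K L, ih (K + 1) (by omega) (by omega) (by omega) (PySem.Set.add s ((GD ^ K % L : Nat) : Int)), PySem.Set.mem_add]
      constructor
      · rintro ((h | h) | ⟨k, hk1, hk2, hz⟩)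
        · exact Or.inl h
        · exact Or.inr ⟨K, le_refl K, by omega, h⟩
        · exact Or.inr ⟨k, by omega, hk2, hz⟩
      · rintro (h | ⟨k, hk1, hk2, hz⟩)
        · exact Or.inl (Or.inl h)
        · by_cases hkK : k = K
          · exact Or.inl (Or.inr (by rw [hz, hkK]))
          · exact Or.inr ⟨k, by omega, hk2, hz⟩

theorem equal_congr (c : List Int) (s s' : PySem.Set Int)
    (h : ∀ z, z ∈ s ↔ z ∈ s') :
    PySem.Set.equal c s = PySem.Set.equal c s' := by
  have key : ∀ (u u' : PySem.Set Int), (∀ z, z ∈ u ↔ z ∈ u') →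
      PySem.Set.equal c u = true → PySem.Set.equal c u' = true := by
    intro u u' hu hc
    rw [PySem.Set.equal_iff] at hc ⊢
    intro x
    exact (hc x).trans (hu x)
  cases hc : PySem.Set.equal c s with
  | true => exact (key _ _ h hc).symm
  | false =>
    cases hc' : PySem.Set.equal c s' with
    | true => exact absurd (key _ _ (fun z => (h z).symm) hc') (by rw [hc]; decide)
    | false => rfl

theorem equal_union0_congr (c : List Int) (s s' : PySem.Set Int)
    (h : ∀ z, z ∈ s ↔ z ∈ s') :
    PySem.Set.equal c (PySem.Set.union s [0]) = PySem.Set.equal c (PySem.Set.union s' [0]) := by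
  refine equal_congr c _ _ (fun z => ?_)
  rw [PySem.Set.mem_union, PySem.Set.mem_union]
  exact or_congr (h z) Iff.rfl

-- membership in B's half-range square set equals membership in A's full-range one
theorem qr_mem (ell : Int) (z : Int) : z ∈ qrB ell ↔ z ∈ qrA ell := by
  unfold qrA qrB
  rw [PySem.Set.mem_ofList, PySem.Set.mem_ofList, List.mem_map, List.mem_map]
  constructor
  · rintro ⟨x, hx, rfl⟩
    rw [PySem.List.mem_pyRange_one] at hx
    exact ⟨x, PySem.List.mem_pyRange_one.mpr ⟨hx.1, lt_of_lt_of_le hx.2 (min_le_left _ _)⟩, rfl⟩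
  · rintro ⟨x, hx, rfl⟩
    rw [PySem.List.mem_pyRange_one] at hx
    obtain ⟨h0, hl⟩ := hx
    have hellpos : 0 < ell := by omega
    have hfd : PySem.Int.floordiv ell 2 = ell / 2 := PySem.Int.floordiv_eq_ediv_of_pos (by omega)
    by_cases hsm : x < min ell (PySem.Int.floordiv ell 2 + 1)
    · exact ⟨x, PySem.List.mem_pyRange_one.mpr ⟨h0, hsm⟩, rfl⟩
    · refine ⟨ell - x, PySem.List.mem_pyRange_one.mpr ⟨by omega, by rw [hfd] at hsm ⊢; omega⟩, ?_⟩
      have hexp : (ell - x) * (ell - x) = x * x + ell * (ell - 2 * x) := by ring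
      rw [hexp, PySem.Int.mod_eq_emod_of_pos hellpos, PySem.Int.mod_eq_emod_of_pos hellpos,
        Int.add_mul_emod_self_left]

theorem genA_some (ell e : Int) (gs : List Int) (g : Int)
    (h : genA ell e gs = some g) :
    g ∈ gs ∧ PySem.Int.powMod g (ell - 1).toNat ell = 1 := by
  induction gs with
  | nil => simp [genA] at h
  | cons a gs ih =>
    simp only [genA] at h
    split_ifs at h with h1 h2
    · cases h
      exact ⟨List.mem_cons_self, h2⟩
    · rcases ih h with ⟨hm, hq⟩
      exact ⟨List.mem_cons_of_mem _ hm, hq⟩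
    · rcases ih h with ⟨hm, hq⟩
      exact ⟨List.mem_cons_of_mem _ hm, hq⟩

theorem genAB (L : Nat) (hL : 3 ≤ L) (e : Int) (he : 1 ≤ e) (gs : List Int)
    (hgs : ∀ g ∈ gs, 2 ≤ g ∧ g < (L : Int)) :
    genA (L : Int) e gs = genB (L : Int) e gs := by
  induction gs with
  | nil => rfl
  | cons g gs ih =>
    obtain ⟨hg2, hgL⟩ := hgs g List.mem_cons_self
    have ihr := ih (fun x hx => hgs x (List.mem_cons_of_mem _ hx))
    have hgcast : g = ((g.toNat : Nat) : Int) := (Int.toNat_of_nonneg (by omega)).symm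
    set G := g.toNat with hGdef
    have hG2 : 2 ≤ G := by omega
    have hGL : G < L := by omega
    have hLt : ((L : Int) - 1).toNat = L - 1 := by omega
    have hQcast : PySem.Int.powMod g ((L : Int) - 1).toNat (L : Int)
        = ((G ^ (L - 1) % L : Nat) : Int) := by
      rw [hgcast, hLt, powMod_cast]
    simp only [genA, genB]
    rw [hgcast]
    by_cases hQ : G ^ (L - 1) % L = 1
    · have hQ1 : PySem.Int.powMod ((G : Nat) : Int) ((L : Int) - 1).toNat (L : Int) = 1 := by
        rw [hLt, powMod_cast, hQ, Nat.cast_one]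
      have hex : ∃ n, G ^ (n + 1) % L = 1 :=
        ⟨L - 2, by rw [show L - 2 + 1 = L - 1 by omega]; exact hQ⟩
      set m := Nat.find hex + 1 with hmdef
      have hm : G ^ m % L = 1 := Nat.find_spec hex
      have h1m : 1 ≤ m := by omega
      have hmin : ∀ s, 1 ≤ s → s < m → G ^ s % L ≠ 1 := by
        intro s hs1 hsm
        have hx := Nat.find_min hex (m := s - 1) (by omega)
        rwa [show s - 1 + 1 = s by omega] at hx
      have hmle : m ≤ L - 1 := by
        have hx := Nat.find_min' hex
          (show G ^ (L - 2 + 1) % L = 1 by rw [show L - 2 + 1 = L - 1 by omega]; exact hQ)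
        omega
      have hord := ordLoopB_inv G L m h1m hm hmin L 1 le_rfl h1m (by omega)
      have hord2 : ordLoopB ((G : Nat) : Int) ((L : Nat) : Int) (((L : Nat) : Int)).toNat
          (((G : Nat) : Int), 1) = (1, (m : Int)) := by
        rw [Int.toNat_natCast]
        rw [pow_one, Nat.mod_eq_of_lt hGL, Nat.cast_one] at hord
        exact hord
      have hecast : e = ((e.toNat : Nat) : Int) := (Int.toNat_of_nonneg (by omega)).symm
      have hPA : (PySem.Int.powMod ((G : Nat) : Int) e.toNat (L : Int) ≠ 1) ↔ ¬ (m ∣ e.toNat) := by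
        rw [powMod_cast]
        simp only [ne_eq, Nat.cast_eq_one]
        exact not_congr (ord_dvd_iff L G m (by omega) h1m hm hmin e.toNat)
      have hmod : PySem.Int.mod e ((m : Nat) : Int) = ((e.toNat % m : Nat) : Int) := by
        conv_lhs => rw [hecast]
        rw [PySem.Int.mod_natCast]
      have hPB : (PySem.Int.mod e ((m : Nat) : Int) ≠ 0) ↔ ¬ (m ∣ e.toNat) := by
        rw [hmod]
        simp only [ne_eq, Int.natCast_eq_zero]
        exact not_congr (Nat.dvd_iff_mod_eq_zero).symm
      rw [hQ1, hord2]
      by_cases hP : m ∣ e.toNat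
      · rw [if_neg (fun hc => (hPA.mp hc) hP)]
        rw [if_pos (rfl : (1 : Int) = 1)]
        rw [if_neg (fun hc => (hPB.mp hc) hP)]
        exact ihr
      · rw [if_pos (hPA.mpr hP), if_pos (rfl : (1 : Int) = 1), if_pos (rfl : (1 : Int) = 1),
          if_pos (hPB.mpr hP)]
    · have hQ0 : ¬ (PySem.Int.powMod ((G : Nat) : Int) ((L : Int) - 1).toNat (L : Int) = 1) := by
        rw [hLt, powMod_cast]
        intro hc
        exact hQ (by exact_mod_cast hc)
      rw [if_neg hQ0]
      split_ifs with h1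
      · exact ihr
      · exact ihr

theorem loop_eq (classes_hit : List Int) (ell : Int) (ds : List Int)
    (h : ∀ d ∈ ds, 2 ≤ d ∧ d < ell) :
    loopA classes_hit ell ds
      = (ds.filter (fun d => PySem.Int.mod (ell - 1) d == 0)).findSome? (matchSubB classes_hit ell) := by
  induction ds with
  | nil => rfl
  | cons d ds ih =>
    have ihr := ih (fun x hx => h x (List.mem_cons_of_mem _ hx))
    obtain ⟨hd2, hdl⟩ := h d List.mem_cons_self
    have hell : 3 ≤ ell := by omega
    have hellcast : ell = ((ell.toNat : Nat) : Int) := (Int.toNat_of_nonneg (by omega)).symm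
    set L := ell.toNat with hLdef
    have hL3 : 3 ≤ L := by omega
    have hdcast : d = ((d.toNat : Nat) : Int) := (Int.toNat_of_nonneg (by omega)).symm
    set D := d.toNat with hDdef
    have hD2 : 2 ≤ D := by omega
    have hDL : D < L := by omega
    by_cases hdvd : PySem.Int.mod (ell - 1) d = 0
    case neg =>
      simp only [loopA]
      rw [if_neg hdvd, List.filter_cons,
        if_neg (by simp only [beq_iff_eq]; exact hdvd)]
      exact ihr
    case pos =>
    simp only [loopA]
    rw [if_pos hdvd, List.filter_cons, if_pos (by simp only [beq_iff_eq]; exact hdvd),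
      List.findSome?_cons]
    simp only [matchSubB]
    have hl1cast : ell - 1 = ((L - 1 : Nat) : Int) := by omega
    have hDdvd : D ∣ (L - 1) := by
      rw [hl1cast, hdcast, PySem.Int.mod_natCast] at hdvd
      exact Nat.dvd_of_mod_eq_zero (by exact_mod_cast hdvd)
    obtain ⟨E, hEdef⟩ : ∃ n : Nat, n = (L - 1) / D := ⟨(L - 1) / D, rfl⟩
    have hEcast : PySem.Int.floordiv (ell - 1) d = ((E : Nat) : Int) := by
      rw [hEdef, hl1cast, hdcast]
      exact PySem.Int.floordiv_natCast _ _
    have hE1 : 1 ≤ E := by rw [hEdef]; exact Nat.div_pos (by omega) (by omega)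
    have hDE : D * E = L - 1 := by rw [hEdef]; exact Nat.mul_div_cancel' hDdvd
    have hEle : E ≤ L - 1 := by rw [hEdef]; exact Nat.div_le_self _ _
    have he1 : (1 : Int) ≤ PySem.Int.floordiv (ell - 1) d := by
      rw [hEcast]; exact_mod_cast hE1
    have hrange : ∀ g ∈ PySem.List.pyRange 2 ((L : Nat) : Int) 1, 2 ≤ g ∧ g < ((L : Nat) : Int) :=
      fun g hg => PySem.List.mem_pyRange_one.mp hg
    have hgeneq : genA ell (PySem.Int.floordiv (ell - 1) d) (PySem.List.pyRange 2 ell 1)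
        = genB ell (PySem.Int.floordiv (ell - 1) d) (PySem.List.pyRange 2 ell 1) := by
      rw [hellcast]
      exact genAB L hL3 _ (by rw [← hellcast]; exact he1) _ hrange
    rw [hgeneq]
    cases hg : genB ell (PySem.Int.floordiv (ell - 1) d) (PySem.List.pyRange 2 ell 1) with
    | none => exact ihr
    | some gen =>
      have hga : genA ell (PySem.Int.floordiv (ell - 1) d) (PySem.List.pyRange 2 ell 1) = some gen := by
        rw [hgeneq, hg]
      obtain ⟨hmemg, hQgen⟩ := genA_some _ _ _ _ hga
      rw [PySem.List.mem_pyRange_one] at hmemg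
      obtain ⟨hgen2, hgenl⟩ := hmemg
      have hgencast : gen = ((gen.toNat : Nat) : Int) := (Int.toNat_of_nonneg (by omega)).symm
      set GEN := gen.toNat with hGENdef
      have hGEN2 : 2 ≤ GEN := by omega
      have hGENL : GEN < L := by omega
      have hLt : (ell - 1).toNat = L - 1 := by omega
      have hQ : GEN ^ (L - 1) % L = 1 := by
        rw [hgencast, hLt, hellcast, powMod_cast] at hQgen
        exact_mod_cast hQgen
      set GD := GEN ^ D % L with hGDdef
      have hGDlt : GD < L := Nat.mod_lt _ (by omega)
      have hgd : PySem.Int.powMod gen d.toNat ell = ((GD : Nat) : Int) := by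
        rw [hgencast, hellcast, ← hDdef]
        exact powMod_cast GEN D L
      have hGDE : GD ^ E % L = 1 := by
        rw [hGDdef, ← Nat.pow_mod, ← pow_mul, hDE]
        exact hQ
      have hex2 : ∃ n, GD ^ (n + 1) % L = 1 :=
        ⟨E - 1, by rw [show E - 1 + 1 = E by omega]; exact hGDE⟩
      set m := Nat.find hex2 + 1 with hm2def
      have hm2 : GD ^ m % L = 1 := Nat.find_spec hex2
      have h1m2 : 1 ≤ m := by omega
      have hmin2 : ∀ s, 1 ≤ s → s < m → GD ^ s % L ≠ 1 := by
        intro s hs1 hsm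
        have hx := Nat.find_min hex2 (m := s - 1) (by omega)
        rwa [show s - 1 + 1 = s by omega] at hx
      have hmE : m ≤ E := by
        have hx := Nat.find_min' hex2
          (show GD ^ (E - 1 + 1) % L = 1 by rw [show E - 1 + 1 = E by omega]; exact hGDE)
        omega
      have hpowkd : ∀ K : Nat, PySem.Int.powMod ((GEN : Nat) : Int) (((K : Nat) : Int) * d).toNat ((L : Nat) : Int)
          = ((GD ^ K % L : Nat) : Int) := by
        intro K
        rw [show (((K : Nat) : Int) * d) = ((K * D : Nat) : Int) by rw [hdcast]; push_cast; ring,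
          Int.toNat_natCast, powMod_cast]
        congr 1
        rw [hGDdef, ← Nat.pow_mod, ← pow_mul, Nat.mul_comm]
      have hsubA : ∀ z, z ∈ subA gen d ell (PySem.Int.floordiv (ell - 1) d)
          ↔ ∃ K, K < E ∧ z = ((GD ^ K % L : Nat) : Int) := by
        intro z
        unfold subA
        rw [PySem.Set.mem_ofList, List.mem_map]
        constructor
        · rintro ⟨k, hk, rfl⟩
          rw [PySem.List.mem_pyRange_one] at hk
          obtain ⟨hk0, hkE⟩ := hk
          have hkcast : k = ((k.toNat : Nat) : Int) := (Int.toNat_of_nonneg hk0).symm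
          refine ⟨k.toNat, ?_, ?_⟩
          · rw [hEcast] at hkE; omega
          · conv_lhs => rw [hgencast, hellcast, hkcast]
            exact hpowkd k.toNat
        · rintro ⟨K, hKE, rfl⟩
          refine ⟨((K : Nat) : Int), ?_, ?_⟩
          · rw [PySem.List.mem_pyRange_one]
            exact ⟨Int.natCast_nonneg K, by rw [hEcast]; exact_mod_cast hKE⟩
          · conv_lhs => rw [hgencast, hellcast]
            exact hpowkd K
      have hinv := closLoopB_inv GD L m h1m2 hm2 hmin2 L 1 le_rfl h1m2 (by omega)
        (PySem.Set.ofList [1])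
      have hsubB : ∀ z, z ∈ closLoopB (PySem.Int.powMod gen d.toNat ell) ell ell.toNat
          (PySem.Set.ofList [1]) (PySem.Int.powMod gen d.toNat ell)
          ↔ ∃ k, k < m ∧ z = ((GD ^ k % L : Nat) : Int) := by
        intro z
        have hinvz := hinv z
        rw [pow_one, Nat.mod_eq_of_lt hGDlt] at hinvz
        rw [hgd]
        conv_lhs => rw [hellcast, Int.toNat_natCast]
        rw [hinvz, PySem.Set.mem_ofList, List.mem_singleton]
        constructor
        · rintro (rfl | ⟨k, hk1, hkm, rfl⟩)
          · exact ⟨0, by omega, by rw [pow_zero, Nat.mod_eq_of_lt (by omega), Nat.cast_one]⟩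
          · exact ⟨k, hkm, rfl⟩
        · rintro ⟨k, hkm, rfl⟩
          rcases Nat.eq_zero_or_pos k with rfl | hk
          · exact Or.inl (by rw [pow_zero, Nat.mod_eq_of_lt (by omega), Nat.cast_one])
          · exact Or.inr ⟨k, hk, hkm, rfl⟩
      have hmid : ∀ z : Int, (∃ K, K < E ∧ z = ((GD ^ K % L : Nat) : Int))
          ↔ (∃ k, k < m ∧ z = ((GD ^ k % L : Nat) : Int)) := by
        intro z
        constructor
        · rintro ⟨K, hK, rfl⟩
          exact ⟨K % m, Nat.mod_lt _ (by omega),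
            congrArg _ (powmod_mod_period L GD m h1m2 hm2 K)⟩
        · rintro ⟨k, hkm, rfl⟩
          exact ⟨k, by omega, rfl⟩
      have hAB : ∀ z, z ∈ subA gen d ell (PySem.Int.floordiv (ell - 1) d)
          ↔ z ∈ closLoopB (PySem.Int.powMod gen d.toNat ell) ell ell.toNat
              (PySem.Set.ofList [1]) (PySem.Int.powMod gen d.toNat ell) :=
        fun z => ((hsubA z).trans (hmid z)).trans (hsubB z).symm
      dsimp only
      rw [equal_union0_congr classes_hit _ _ hAB]
      split_ifs with hC
      · rfl
      · exact ihr

-- ===== VERDICT (by name: the statement is the Claim_ definition above) =====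
theorem analyze_classes_spec : Claim_equal_analyze_classes := by
  intro classes_hit ell _
  simp only [Spec_analyze_classes, analyze_classes, analyze_classes_alt]
  have hqr : PySem.Set.equal classes_hit (qrA ell) = PySem.Set.equal classes_hit (qrB ell) :=
    equal_congr classes_hit _ _ (fun z => (qr_mem ell z).symm)
  have hqnr : ∀ z, z ∈ PySem.Set.diff (PySem.Set.ofList (PySem.List.pyRange 0 ell 1)) (qrA ell)
      ↔ z ∈ PySem.Set.ofList ((PySem.List.pyRange 0 ell 1).filter
          (fun x => !(PySem.Set.contains (qrB ell) x))) := by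
    intro z
    rw [PySem.Set.mem_diff, PySem.Set.mem_ofList, PySem.Set.mem_ofList, List.mem_filter]
    constructor
    · rintro ⟨hz, hnq⟩
      refine ⟨hz, ?_⟩
      rw [Bool.not_eq_true', ← Bool.not_eq_true, PySem.Set.contains_iff]
      exact fun hc => hnq ((qr_mem ell z).mp hc)
    · rintro ⟨hz, hnq⟩
      rw [Bool.not_eq_true', ← Bool.not_eq_true, PySem.Set.contains_iff] at hnq
      exact ⟨hz, fun hc => hnq ((qr_mem ell z).mpr hc)⟩
  rw [hqr, equal_union0_congr classes_hit _ _ hqnr]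
  split_ifs with h1 h2
  · rfl
  · rfl
  · exact loop_eq classes_hit ell _ (fun d hd => (PySem.List.mem_pyRange_one).1 hd)
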